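-- pv_equiv track=rewrite | github.com/archzi/Tetris | game.py | transform
-- ===== SOURCE A (Python) =====
-- def transform(block,direction = 0):
--     '''
--
--     :param block:  传进来的参数为 blocks[blocks_num][0]
--     :param direction: 转换的方向，0代表逆时针，1 代表 顺时针
--     :return: 变换参数后的方块形状矩阵
--     '''
--     result = []
--     for y in range(4):
--         result.append([])
--         for x in range(4):
--             if direction ==0:
--                 result[y].append(block[x][3-y])
--             else:
--                 result[y].append(block[3-x][y])
--     return result
-- ===== SOURCE B (Python) =====
-- def transform(block, direction=0):
--     T = [[block[x][y] for x in range(4)] for y in range(4)]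
--     if direction == 0:
--         return T[::-1]
--     return [row[::-1] for row in T]
-- ===== Notes on version B (the rewrite author's own statement) =====
-- stated objective: simpler
-- what changed: Replaced the per-cell rotation index arithmetic (3-y / 3-x, with the direction test inside the inner loop) by a transpose comprehension followed by one reversal: of the row order for counterclockwise, of each row for clockwise.
import Mathlib
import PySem

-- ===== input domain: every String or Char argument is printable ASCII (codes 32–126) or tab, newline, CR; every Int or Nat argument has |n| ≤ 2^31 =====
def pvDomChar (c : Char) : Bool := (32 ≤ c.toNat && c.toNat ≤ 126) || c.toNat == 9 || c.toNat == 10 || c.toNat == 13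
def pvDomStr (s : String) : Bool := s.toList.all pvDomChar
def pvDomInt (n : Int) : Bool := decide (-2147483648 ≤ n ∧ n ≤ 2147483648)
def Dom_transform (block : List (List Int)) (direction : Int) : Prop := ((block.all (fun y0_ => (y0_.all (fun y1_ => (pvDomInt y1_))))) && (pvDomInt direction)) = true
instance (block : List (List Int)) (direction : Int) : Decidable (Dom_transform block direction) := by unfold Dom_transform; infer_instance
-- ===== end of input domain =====

-- B rotates the 4x4 submatrix by the transpose-then-reverse idiom instead of per-cell index
-- arithmetic; return-value equivalence on blocks with at least 4 rows of at least 4 entries.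

-- ===== PORT A =====
def transform (block : List (List Int)) (direction : Int) : List (List Int) :=
  (PySem.List.pyRange 0 4 1).foldl (fun result y =>
    result ++ [(PySem.List.pyRange 0 4 1).foldl (fun row x =>
      row ++ [if direction == 0
        then PySem.List.pyGetD (PySem.List.pyGetD block x []) (3 - y) 0
        else PySem.List.pyGetD (PySem.List.pyGetD block (3 - x) []) y 0]) []]) []

-- ===== PORT B =====
def transform_alt (block : List (List Int)) (direction : Int) : List (List Int) :=
  let T := (PySem.List.pyRange 0 4 1).map (fun y =>
    (PySem.List.pyRange 0 4 1).map (fun x =>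
      PySem.List.pyGetD (PySem.List.pyGetD block x []) y 0))
  if direction == 0 then T.reverse else T.map (fun row => row.reverse)

-- ===== PRECONDITION & SPEC =====
-- A indexes block[0..3][0..3]; it raises IndexError unless there are ≥ 4 rows whose first 4 each have ≥ 4 entries.
def Pre_transform (block : List (List Int)) (direction : Int) : Prop :=
  4 ≤ block.length ∧ ∀ r ∈ block.take 4, 4 ≤ r.length
instance (block : List (List Int)) (direction : Int) : Decidable (Pre_transform block direction) := by unfold Pre_transform; infer_instance
def pvWitness_transform : List (List Int) × Int := ([[1,2,3,4],[5,6,7,8],[9,10,11,12],[13,14,15,16]], 0)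

def Spec_transform (block : List (List Int)) (direction : Int) (out : List (List Int)) : Prop := out = transform_alt block direction
instance (block : List (List Int)) (direction : Int) (out : List (List Int)) : Decidable (Spec_transform block direction out) := by unfold Spec_transform; infer_instance

-- ===== CLAIM (what is proved, stated in full; the proofs are below) =====
def Claim_equal_transform : Prop := ∀ (block : List (List Int)) (direction : Int), Dom_transform block direction → Pre_transform block direction → Spec_transform block direction (transform block direction)
-- ===== LEMMAS AND PROOFS =====
theorem four_le_shape {α : Type} (l : List α) (h : 4 ≤ l.length) :
    ∃ a b c d t, l = a :: b :: c :: d :: t := by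
  match l with
  | a :: b :: c :: d :: t => exact ⟨a, b, c, d, t, rfl⟩
  | [] | [_] | [_,_] | [_,_,_] => simp at h

-- ===== VERDICT (by name: the statement is the Claim_ definition above) =====
set_option maxHeartbeats 1000000 in
theorem transform_spec : Claim_equal_transform := by
  intro block direction _ hpre
  obtain ⟨hlen, hrows⟩ := hpre
  obtain ⟨r0, r1, r2, r3, rest, rfl⟩ := four_le_shape block hlen
  obtain ⟨a0, a1, a2, a3, t0, rfl⟩ := four_le_shape r0 (hrows _ (by simp))
  obtain ⟨b0, b1, b2, b3, t1, rfl⟩ := four_le_shape r1 (hrows _ (by simp))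
  obtain ⟨c0, c1, c2, c3, t2, rfl⟩ := four_le_shape r2 (hrows _ (by simp))
  obtain ⟨d0, d1, d2, d3, t3, rfl⟩ := four_le_shape r3 (hrows _ (by simp))
  show transform _ _ = transform_alt _ _
  by_cases hd : direction = 0
  · subst hd
    have hA : transform ((a0::a1::a2::a3::t0)::(b0::b1::b2::b3::t1)::(c0::c1::c2::c3::t2)::(d0::d1::d2::d3::t3)::rest) 0
        = [[a3,b3,c3,d3],[a2,b2,c2,d2],[a1,b1,c1,d1],[a0,b0,c0,d0]] := by
      rw [transform, show PySem.List.pyRange 0 4 1 = [0,1,2,3] from by decide]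
      simp only [List.foldl_cons, List.foldl_nil]
      norm_num [PySem.List.pyGetD_ofNat', List.getD]
    have hB : transform_alt ((a0::a1::a2::a3::t0)::(b0::b1::b2::b3::t1)::(c0::c1::c2::c3::t2)::(d0::d1::d2::d3::t3)::rest) 0
        = [[a3,b3,c3,d3],[a2,b2,c2,d2],[a1,b1,c1,d1],[a0,b0,c0,d0]] := by
      rw [transform_alt, show PySem.List.pyRange 0 4 1 = [0,1,2,3] from by decide]
      simp only [List.map_cons, List.map_nil]
      norm_num [PySem.List.pyGetD_ofNat', List.getD]
    rw [hA, hB]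
  · have hd' : (direction == 0) = false := by simp [hd]
    have hA : transform ((a0::a1::a2::a3::t0)::(b0::b1::b2::b3::t1)::(c0::c1::c2::c3::t2)::(d0::d1::d2::d3::t3)::rest) direction
        = [[d0,c0,b0,a0],[d1,c1,b1,a1],[d2,c2,b2,a2],[d3,c3,b3,a3]] := by
      rw [transform, show PySem.List.pyRange 0 4 1 = [0,1,2,3] from by decide]
      simp only [List.foldl_cons, List.foldl_nil]
      norm_num [hd', PySem.List.pyGetD_ofNat', List.getD]
    have hB : transform_alt ((a0::a1::a2::a3::t0)::(b0::b1::b2::b3::t1)::(c0::c1::c2::c3::t2)::(d0::d1::d2::d3::t3)::rest) direction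
        = [[d0,c0,b0,a0],[d1,c1,b1,a1],[d2,c2,b2,a2],[d3,c3,b3,a3]] := by
      rw [transform_alt, show PySem.List.pyRange 0 4 1 = [0,1,2,3] from by decide]
      simp only [List.map_cons, List.map_nil]
      norm_num [hd', PySem.List.pyGetD_ofNat', List.getD]
    rw [hA, hB]
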